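-- pv_equiv track=rewrite | github.com/warshmellow/warshmellow-cses | subordinates.py | f
-- ===== SOURCE A (Python) =====
-- from collections import defaultdict
-- from functools import lru_cache
--
-- def f(bosses):
--     adj = defaultdict(list)
--
--     n = len(bosses) + 1
--
--     for i, boss in enumerate(bosses):
--         sub = i + 2
--         adj[boss].append(sub)
--
--     @lru_cache
--     def count_subs(boss):
--         direct_subs = adj[boss]
--
--         return sum([1 + count_subs(direct_sub) for direct_sub in direct_subs])
--
--     return [count_subs(i) for i in range(1, n + 1)]
-- ===== SOURCE B (Python) =====
-- def f(bosses):
--     n = len(bosses) + 1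
--     parent = {i + 2: b for i, b in enumerate(bosses)}
--     count = {}
--     for b in bosses:
--         v = b
--         while True:
--             count[v] = count.get(v, 0) + 1
--             if v not in parent:
--                 break
--             v = parent[v]
--     return [count.get(v, 0) for v in range(1, n + 1)]
-- ===== Notes on version B (the rewrite author's own statement) =====
-- stated objective: alternative
-- what changed: Replaces the memoized recursive DFS over a child-adjacency defaultdict with an iterative bottom-up pass: each employee walks up its boss/ancestor chain once, incrementing a counter for every ancestor visited (no recursion, no cache, no adjacency lists).
-- outside the precondition, e.g. on f([2]): A raises RecursionError, B does not finish within the time limit; on f([3, 3]): A raises RecursionError, B does not finish within the time limit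
import Mathlib
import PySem

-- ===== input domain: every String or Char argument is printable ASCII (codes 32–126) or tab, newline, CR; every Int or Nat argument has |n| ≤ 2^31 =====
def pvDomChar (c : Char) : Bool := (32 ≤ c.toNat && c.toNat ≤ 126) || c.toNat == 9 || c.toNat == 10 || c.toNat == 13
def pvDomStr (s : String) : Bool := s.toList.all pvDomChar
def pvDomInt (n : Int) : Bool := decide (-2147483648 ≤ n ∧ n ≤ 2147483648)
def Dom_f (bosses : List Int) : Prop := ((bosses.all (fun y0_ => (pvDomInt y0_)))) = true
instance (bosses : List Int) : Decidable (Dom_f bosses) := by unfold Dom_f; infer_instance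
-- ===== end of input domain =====

-- B replaces A's memoized recursive DFS by an iterative bottom-up pass: each employee
-- walks up its boss/ancestor chain incrementing a counter for every ancestor visited.

-- ===== PORT A =====
-- A's count_subs is recursive; lru_cache does not change the returned value, so the
-- port recurses directly with a fuel bound (inside Pre_f the boss graph is acyclic, so
-- every downward path has at most bosses.length+1 nodes and fuel bosses.length+1
-- never truncates).
def countSubs (adj : PySem.Dict Int (List Int)) : Nat → Int → Int
  | 0, _ => 0
  | fuel+1, boss =>
      ((PySem.Dict.getD adj boss []).map (fun s => 1 + countSubs adj fuel s)).sum

def f (bosses : List Int) : List Int :=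
  let adj : PySem.Dict Int (List Int) :=
    (PySem.List.enumerate bosses 0).foldl
      (fun d p => PySem.Dict.modify d p.2 [] (fun l => l ++ [p.1 + 2])) PySem.Dict.empty
  let n : Int := (bosses.length : Int) + 1
  (PySem.List.pyRange 1 (n + 1) 1).map (fun i => countSubs adj (bosses.length + 1) i)

-- ===== PORT B =====
-- Source B's inner 'while True' walk up the boss chain; the fuel bound bosses.length+1 is
-- for termination only: inside Pre_f a chain visits pairwise distinct nodes, of which
-- at most bosses.length have a parent, so the walk ends within bosses.length+1 steps.
def pvWalk (parent : PySem.Dict Int Int) : Nat → PySem.Dict Int Int → Int → PySem.Dict Int Int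
  | 0, c, _ => c
  | fuel+1, c, v =>
      let c1 := PySem.Dict.insert c v (PySem.Dict.getD c v 0 + 1)
      match PySem.Dict.get? parent v with
      | none => c1
      | some w => pvWalk parent fuel c1 w

def f_alt (bosses : List Int) : List Int :=
  let n : Int := (bosses.length : Int) + 1
  let parent : PySem.Dict Int Int :=
    (PySem.List.enumerate bosses 0).foldl
      (fun d p => PySem.Dict.insert d (p.1 + 2) p.2) PySem.Dict.empty
  let count : PySem.Dict Int Int :=
    bosses.foldl (fun c b => pvWalk parent (bosses.length + 1) c b) PySem.Dict.empty
  (PySem.List.pyRange 1 (n + 1) 1).map (fun v => PySem.Dict.getD count v 0)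

-- ===== PRECONDITION & SPEC =====
-- the parent map of the boss graph (node u = employee id; boss of u is bosses[u-2])
def pvParent (bosses : List Int) (u : Int) : Option Int :=
  if 2 ≤ u then PySem.List.pyGet? bosses (u - 2) else none

-- plain reachability along the parent map in at most `fuel` steps
def pvReach (bosses : List Int) : Nat → Int → Int → Bool
  | 0, _, _ => false
  | fuel+1, u, v =>
      match pvParent bosses u with
      | none => false
      | some b => b == v || pvReach bosses fuel b v

-- Pre_f: the boss graph is acyclic — no node's boss/ancestor chain returns to itself
-- (a cycle, if one exists, closes within bosses.length+1 steps); on cyclic inputs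
-- A raises RecursionError (and B's while-loop does not terminate), so they are excluded.
def Pre_f (bosses : List Int) : Prop :=
  ∀ q ∈ PySem.List.enumerate bosses 0,
    pvReach bosses (bosses.length + 1) (q.1 + 2) (q.1 + 2) = false
instance (bosses : List Int) : Decidable (Pre_f bosses) := by unfold Pre_f; infer_instance

def pvWitness_f : List Int := ([1, 1, 2])

def Spec_f (bosses : List Int) (out : List Int) : Prop := out = f_alt bosses
instance (bosses : List Int) (out : List Int) : Decidable (Spec_f bosses out) := by unfold Spec_f; infer_instance

-- ===== CLAIM (what is proved, stated in full; the proofs are below) =====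
def Claim_equal_f : Prop := ∀ (bosses : List Int), Dom_f bosses → Pre_f bosses → Spec_f bosses (f bosses)

-- ===== LEMMAS AND PROOFS =====

-- proof-side abbreviations
def pvE (bosses : List Int) : List (Int × Int) := PySem.List.enumerate bosses 0

def pvAdj (bosses : List Int) : PySem.Dict Int (List Int) :=
  (pvE bosses).foldl
    (fun d p => PySem.Dict.modify d p.2 [] (fun l => l ++ [p.1 + 2])) PySem.Dict.empty

def pvPar (bosses : List Int) : PySem.Dict Int Int :=
  (pvE bosses).foldl (fun d p => PySem.Dict.insert d (p.1 + 2) p.2) PySem.Dict.empty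

def pvChildren (bosses : List Int) (v : Int) : List Int :=
  ((pvE bosses).filter (fun q => q.2 == v)).map (fun q => q.1 + 2)

-- the list of nodes visited by Source B's while-walk starting at b (inclusive)
def pvChain (bosses : List Int) : Nat → Int → List Int
  | 0, _ => []
  | fuel+1, b =>
      b :: (match pvParent bosses b with
            | none => []
            | some w => pvChain bosses fuel w)

theorem pvParent_of_mem (bosses : List Int) (q : Int × Int) (hq : q ∈ pvE bosses) :
    pvParent bosses (q.1 + 2) = some q.2 := by
  obtain ⟨k, hk, rfl⟩ := (PySem.List.mem_enumerate_iff _ _ _).mp hq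
  simp only [pvParent]
  rw [if_pos (by omega)]
  have : (0 : Int) + (k : Int) + 2 - 2 = (k : Int) := by omega
  rw [this, PySem.List.pyGet?_natCast]
  simp [hk]

theorem pvParent_some (bosses : List Int) (u v : Int) (h : pvParent bosses u = some v) :
    ∃ q ∈ pvE bosses, u = q.1 + 2 ∧ v = q.2 := by
  simp only [pvParent] at h
  split_ifs at h with h2
  have hnn : 0 ≤ u - 2 := by omega
  obtain ⟨k, hku⟩ := Int.eq_ofNat_of_zero_le hnn
  rw [hku] at h
  rw [PySem.List.pyGet?_natCast] at h
  have hk : k < bosses.length := by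
    by_contra hge
    rw [List.getElem?_eq_none (by omega)] at h
    simp at h
  refine ⟨((k : Int), bosses[k]), ?_, by omega, ?_⟩
  · exact (PySem.List.mem_enumerate_iff _ _ _).mpr ⟨k, hk, by simp⟩
  · rw [List.getElem?_eq_getElem hk] at h
    exact (Option.some.inj h).symm

theorem pvFoldIns (bosses : List Int) :
    ∀ (s : Int) (d0 : PySem.Dict Int Int) (u : Int),
      PySem.Dict.get? ((PySem.List.enumerate bosses s).foldl
          (fun d p => PySem.Dict.insert d (p.1 + 2) p.2) d0) u =
        if s + 2 ≤ u ∧ u < s + 2 + bosses.length then bosses[(u - s - 2).toNat]?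
        else PySem.Dict.get? d0 u := by
  induction bosses with
  | nil => intro s d0 u; simp [PySem.List.enumerate_nil]
  | cons b tl ih =>
    intro s d0 u
    rw [PySem.List.enumerate_cons, List.foldl_cons, ih (s+1)]
    by_cases hup : s + 1 + 2 ≤ u ∧ u < s + 1 + 2 + tl.length
    · rw [if_pos hup, if_pos (by simp; omega)]
      have h1 : (u - s - 2).toNat = (u - (s+1) - 2).toNat + 1 := by omega
      have h2 : u - (s+1) - 2 = u - s - 3 := by ring
      rw [h1]
      simp [h2]
    · rw [if_neg hup, PySem.Dict.get?_insert]
      by_cases he : u = s + 2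
      · rw [if_pos he, if_pos (by simp; omega)]
        have : (u - s - 2).toNat = 0 := by omega
        simp [this]
      · rw [if_neg he, if_neg (by simp; omega)]

theorem pvPar_get? (bosses : List Int) (u : Int) :
    PySem.Dict.get? (pvPar bosses) u = pvParent bosses u := by
  unfold pvPar pvE pvParent
  rw [pvFoldIns]
  by_cases h2 : 2 ≤ u
  · rw [if_pos h2]
    have hk : u - 2 = ((u - 2).toNat : Int) := by omega
    rw [hk, PySem.List.pyGet?_natCast]
    by_cases hin : u < 2 + bosses.length
    · rw [if_pos (by constructor <;> omega)]
      have : u - 0 - 2 = u - 2 := by ring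
      rw [this]
    · rw [if_neg (by omega), List.getElem?_eq_none (by omega), PySem.Dict.get?_empty]
  · rw [if_neg (by omega), if_neg h2, PySem.Dict.get?_empty]

theorem pvChildren_mem (bosses : List Int) (v c : Int) :
    c ∈ pvChildren bosses v ↔ pvParent bosses c = some v := by
  unfold pvChildren
  constructor
  · intro hc
    obtain ⟨q, hq, rfl⟩ := List.mem_map.mp hc
    have hqE := List.mem_of_mem_filter hq
    have hv : q.2 = v := by simpa using List.of_mem_filter hq
    rw [pvParent_of_mem bosses q hqE, hv]
  · intro h
    obtain ⟨q, hqE, rfl, rfl⟩ := pvParent_some bosses c v h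
    exact List.mem_map.mpr ⟨q, List.mem_filter.mpr ⟨hqE, by simp⟩, rfl⟩

theorem pvChildren_nodup (bosses : List Int) (v : Int) :
    (pvChildren bosses v).Nodup := by
  unfold pvChildren
  have hpw : (pvE bosses).Pairwise (fun p q => p.1 < q.1) := PySem.List.pairwise_lt_enumerate _ _
  have hf : (((pvE bosses).filter (fun q => q.2 == v))).Pairwise (fun p q => p.1 < q.1) :=
    hpw.filter _
  have : ((((pvE bosses).filter (fun q => q.2 == v))).map (fun q => q.1 + 2)).Pairwise (· < ·) :=
    List.Pairwise.map _ (by intro a b h; omega) hf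
  exact this.imp (fun h => ne_of_lt h)

theorem pvReach_mono (bosses : List Int) (g : Nat) :
    ∀ (f : Nat) (u v : Int), f ≤ g → pvReach bosses f u v = true → pvReach bosses g u v = true := by
  induction g with
  | zero => intro f u v hf h; interval_cases f; exact h
  | succ g ih =>
    intro f u v hf h
    match f, h with
    | 0, h => exact absurd h (by simp [pvReach])
    | f+1, h =>
      simp only [pvReach] at h ⊢
      cases hp : pvParent bosses u with
      | none => rw [hp] at h; exact absurd h (by simp)
      | some b =>
        rw [hp] at h
        rcases Bool.or_eq_true_iff.mp h with h' | h'
        · exact Bool.or_eq_true_iff.mpr (Or.inl h')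
        · exact Bool.or_eq_true_iff.mpr (Or.inr (ih f b v (by omega) h'))

theorem pvReach_step (bosses : List Int) (f : Nat) (u v : Int)
    (h : pvParent bosses u = some v) : pvReach bosses (f+1) u v = true := by
  simp [pvReach, h]

theorem pvReach_extend (bosses : List Int) :
    ∀ (f : Nat) (u c v : Int), pvReach bosses f u c = true →
      pvParent bosses c = some v → pvReach bosses (f+1) u v = true := by
  intro f
  induction f with
  | zero => intro u c v h; exact absurd h (by simp [pvReach])
  | succ f ih =>
    intro u c v h hc
    simp only [pvReach] at h ⊢
    cases hp : pvParent bosses u with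
    | none => rw [hp] at h; exact absurd h (by simp)
    | some b =>
      rw [hp] at h
      simp only
      rcases Bool.or_eq_true_iff.mp h with h' | h'
      · -- b = c, so pvParent b = some v, one step
        have hb : b = c := by simpa using h'
        subst hb
        exact Bool.or_eq_true_iff.mpr (Or.inr (pvReach_step bosses f b v hc))
      · exact Bool.or_eq_true_iff.mpr (Or.inr (ih b c v h' hc))

theorem pvReach_last (bosses : List Int) :
    ∀ (f : Nat) (u v : Int), pvReach bosses (f+1) u v = true →
      ∃ c, pvParent bosses c = some v ∧ (u = c ∨ pvReach bosses f u c = true) := by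
  intro f
  induction f with
  | zero =>
    intro u v h
    simp only [pvReach] at h
    cases hp : pvParent bosses u with
    | none => rw [hp] at h; exact absurd h (by simp)
    | some b =>
      rw [hp] at h
      have hb : b = v := by simpa using h
      exact ⟨u, by rw [hp, hb], Or.inl rfl⟩
  | succ f ih =>
    intro u v h
    simp only [pvReach] at h
    cases hp : pvParent bosses u with
    | none => rw [hp] at h; exact absurd h (by simp)
    | some b =>
      rw [hp] at h
      rcases Bool.or_eq_true_iff.mp h with h' | h'
      · have hb : b = v := by simpa using h'
        exact ⟨u, by rw [hp, hb], Or.inl rfl⟩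
      · obtain ⟨c, hc, hd⟩ := ih b v h'
        refine ⟨c, hc, Or.inr ?_⟩
        rcases hd with rfl | hr
        · exact pvReach_step bosses f u b hp
        · simp only [pvReach, hp]
          exact Bool.or_eq_true_iff.mpr (Or.inr hr)

theorem pvReach_det (bosses : List Int) :
    ∀ (f : Nat) (u a b : Int), pvReach bosses f u a = true → pvReach bosses f u b = true →
      a = b ∨ pvReach bosses f a b = true ∨ pvReach bosses f b a = true := by
  intro f
  induction f with
  | zero => intro u a b h; exact absurd h (by simp [pvReach])
  | succ f ih =>
    intro u a b ha hb
    simp only [pvReach] at ha hb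
    cases hp : pvParent bosses u with
    | none => rw [hp] at ha; exact absurd ha (by simp)
    | some w =>
      rw [hp] at ha hb
      rcases Bool.or_eq_true_iff.mp ha with ha' | ha' <;>
        rcases Bool.or_eq_true_iff.mp hb with hb' | hb'
      · left; have h1 : w = a := by simpa using ha'
        have h2 : w = b := by simpa using hb'
        omega
      · right; left
        have h1 : w = a := by simpa using ha'
        subst h1
        exact pvReach_mono bosses (f+1) f w b (by omega) hb'
      · right; right
        have h1 : w = b := by simpa using hb'
        subst h1
        exact pvReach_mono bosses (f+1) f w a (by omega) ha'
      · rcases ih w a b ha' hb' with h | h | h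
        · exact Or.inl h
        · exact Or.inr (Or.inl (pvReach_mono bosses (f+1) f a b (by omega) h))
        · exact Or.inr (Or.inr (pvReach_mono bosses (f+1) f b a (by omega) h))

theorem pvAcyc (bosses : List Int) (hpre : Pre_f bosses) (g : Nat)
    (hg : g ≤ bosses.length + 1) (u : Int) : pvReach bosses g u u = false := by
  by_contra hne
  have htrue : pvReach bosses g u u = true := by
    cases h : pvReach bosses g u u with
    | false => exact absurd h hne
    | true => rfl
  match g, htrue with
  | gg+1, htrue =>
    have h1 := htrue
    simp only [pvReach] at h1
    cases hp : pvParent bosses u with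
    | none => rw [hp] at h1; exact absurd h1 (by simp)
    | some b =>
      obtain ⟨q, hq, hu, _⟩ := pvParent_some bosses u b hp
      have hfalse := hpre q hq
      rw [← hu] at hfalse
      have := pvReach_mono bosses (bosses.length + 1) (gg+1) u u hg htrue
      rw [this] at hfalse
      exact Bool.noConfusion hfalse

theorem pvNoSibling (bosses : List Int) (hpre : Pre_f bosses) (f : Nat)
    (hf : f ≤ bosses.length) (v c1 c2 : Int)
    (h1 : pvParent bosses c1 = some v) (h2 : pvParent bosses c2 = some v)
    (hr : pvReach bosses f c1 c2 = true) : False := by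
  match f, hr with
  | ff+1, hr =>
    have h1' := hr
    simp only [pvReach, h1] at h1'
    rcases Bool.or_eq_true_iff.mp h1' with h' | h'
    · -- v = c2, so pvParent c2 = some c2 : 1-cycle
      have hv : v = c2 := by simpa using h'
      subst hv
      have := pvReach_step bosses (bosses.length) v v h2
      rw [pvAcyc bosses hpre (bosses.length + 1) (by omega) v] at this
      exact Bool.noConfusion this
    · -- v reaches c2 and c2 → v : cycle at v
      have := pvReach_extend bosses ff v c2 v h' h2
      have hmono := pvReach_mono bosses (bosses.length + 1) (ff+1) v v (by omega) this
      rw [pvAcyc bosses hpre (bosses.length + 1) (by omega) v] at hmono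
      exact Bool.noConfusion hmono

theorem pvUniq (bosses : List Int) (hpre : Pre_f bosses) (f : Nat)
    (hf : f ≤ bosses.length) (v u c1 c2 : Int)
    (h1 : pvParent bosses c1 = some v) (h2 : pvParent bosses c2 = some v)
    (d1 : u = c1 ∨ pvReach bosses f u c1 = true)
    (d2 : u = c2 ∨ pvReach bosses f u c2 = true) : c1 = c2 := by
  rcases d1 with rfl | hr1
  · rcases d2 with rfl | hr2
    · rfl
    · exact absurd hr2 (fun h => pvNoSibling bosses hpre f hf v u c2 h1 h2 h)
  · rcases d2 with rfl | hr2
    · exact absurd hr1 (fun h => pvNoSibling bosses hpre f hf v u c1 h2 h1 h)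
    · rcases pvReach_det bosses f u c1 c2 hr1 hr2 with h | h | h
      · exact h
      · exact absurd h (fun h => pvNoSibling bosses hpre f hf v c1 c2 h1 h2 h)
      · exact absurd h (fun h => pvNoSibling bosses hpre f hf v c2 c1 h2 h1 h)

theorem pvCountPOr {α : Type} (L : List α) (p q : α → Bool)
    (h : ∀ x ∈ L, ¬(p x = true ∧ q x = true)) :
    L.countP (fun x => p x || q x) = L.countP p + L.countP q := by
  induction L with
  | nil => simp
  | cons a L ih =>
    have ha := h a (by simp)
    have hL : ∀ x ∈ L, ¬(p x = true ∧ q x = true) := fun x hx => h x (by simp [hx])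
    by_cases hp : p a = true
    · have hq : q a = false := by
        cases hqa : q a with
        | true => exact absurd ⟨hp, hqa⟩ ha
        | false => rfl
      simp [hp, hq, ih hL]; omega
    · have hp' : p a = false := by simpa using hp
      by_cases hq : q a = true
      · simp [hp', hq, ih hL]; omega
      · have hq' : q a = false := by simpa using hq
        simp [hp', hq', ih hL]

theorem pvCountPAny {α : Type} (L : List α) : ∀ (ch : List Int) (P : Int → α → Bool),
    ch.Nodup →
    (∀ x ∈ L, ∀ c1 ∈ ch, ∀ c2 ∈ ch, P c1 x = true → P c2 x = true → c1 = c2) →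
    L.countP (fun x => ch.any (fun c => P c x)) = (ch.map (fun c => L.countP (P c))).sum := by
  intro ch
  induction ch with
  | nil => intro P _ _; simp
  | cons c ch ih =>
    intro P hnd hdisj
    have hnd' := (List.nodup_cons.mp hnd).2
    have hcn : c ∉ ch := (List.nodup_cons.mp hnd).1
    have hsplit : L.countP (fun x => (c :: ch).any (fun d => P d x))
        = L.countP (P c) + L.countP (fun x => ch.any (fun d => P d x)) := by
      have := pvCountPOr L (P c) (fun x => ch.any (fun d => P d x)) ?_
      · simpa [List.any_cons] using this
      · intro x hx ⟨hPc, hany⟩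
        obtain ⟨d, hd, hPd⟩ := List.any_eq_true.mp hany
        have := hdisj x hx c (by simp) d (by simp [hd]) hPc hPd
        exact hcn (this ▸ hd)
    rw [hsplit, ih P hnd' (fun x hx c1 h1 c2 h2 => hdisj x hx c1 (by simp [h1]) c2 (by simp [h2]))]
    simp

theorem pvAdjEq (bosses : List Int) (v : Int) :
    PySem.Dict.getD (pvAdj bosses) v [] = pvChildren bosses v := by
  unfold pvAdj pvChildren
  have h : (pvE bosses).foldl
      (fun d p => PySem.Dict.modify d p.2 [] (fun l => l ++ [p.1 + 2])) PySem.Dict.empty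
    = ((pvE bosses).map (fun p => (p.2, p.1 + 2))).foldl
      (fun d q => PySem.Dict.modify d q.1 [] (fun l => l ++ [q.2])) PySem.Dict.empty := by
    rw [List.foldl_map]
  rw [h, PySem.Dict.getD_foldl_modify_append, PySem.Dict.getD_empty, List.filter_map, List.map_map]
  rfl

theorem pvReachIff (bosses : List Int) (f : Nat) (u v : Int) :
    pvReach bosses (f+1) u v = true ↔
      ∃ c ∈ pvChildren bosses v, (u = c ∨ pvReach bosses f u c = true) := by
  constructor
  · intro h
    obtain ⟨c, hc, hd⟩ := pvReach_last bosses f u v h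
    exact ⟨c, (pvChildren_mem bosses v c).mpr hc, hd⟩
  · rintro ⟨c, hc, hd⟩
    have hp := (pvChildren_mem bosses v c).mp hc
    rcases hd with rfl | hr
    · exact pvReach_step bosses f u v hp
    · exact pvReach_extend bosses f u c v hr hp

theorem pvCore (bosses : List Int) (hpre : Pre_f bosses) :
    ∀ (f : Nat), f + 1 ≤ bosses.length + 1 → ∀ (v : Int),
      countSubs (pvAdj bosses) (f+1) v =
        ((pvE bosses).countP (fun q => q.2 == v || pvReach bosses f q.2 v) : Int) := by
  intro f
  induction f with
  | zero =>
    intro _ v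
    show ((PySem.Dict.getD (pvAdj bosses) v []).map (fun s => 1 + countSubs (pvAdj bosses) 0 s)).sum = _
    rw [pvAdjEq]
    have h1 : ∀ c, (1 : Int) + countSubs (pvAdj bosses) 0 c = 1 := by intro c; rfl
    calc ((pvChildren bosses v).map (fun s => 1 + countSubs (pvAdj bosses) 0 s)).sum
        = ((pvChildren bosses v).map (fun _ => (1 : Int))).sum := by
          exact congrArg List.sum (List.map_congr_left (fun c _ => h1 c))
      _ = ((pvChildren bosses v).length : Int) * 1 := PySem.List.sum_map_const_int _ _
      _ = (((pvE bosses).countP (fun q => q.2 == v || pvReach bosses 0 q.2 v)) : Int) := by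
          unfold pvChildren
          rw [List.length_map, ← List.countP_eq_length_filter]
          have : ∀ q : Int × Int, (q.2 == v || pvReach bosses 0 q.2 v) = (q.2 == v) := by
            intro q; simp [pvReach]
          simp only [this]
          ring
  | succ f ih =>
    intro hf v
    have hf' : f + 1 ≤ bosses.length + 1 := by omega
    have hflen : f ≤ bosses.length := by omega
    show ((PySem.Dict.getD (pvAdj bosses) v []).map
        (fun s => 1 + countSubs (pvAdj bosses) (f+1) s)).sum = _
    rw [pvAdjEq]
    -- LHS: 1 + IH for each child
    have hL : ((pvChildren bosses v).map (fun s => 1 + countSubs (pvAdj bosses) (f+1) s)).sum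
        = ((pvChildren bosses v).length : Int)
          + ((pvChildren bosses v).map
              (fun c => ((pvE bosses).countP (fun q => q.2 == c || pvReach bosses f q.2 c) : Int))).sum := by
      have hcongr : ((pvChildren bosses v).map (fun s => 1 + countSubs (pvAdj bosses) (f+1) s))
          = ((pvChildren bosses v).map
              (fun c => 1 + ((pvE bosses).countP (fun q => q.2 == c || pvReach bosses f q.2 c) : Int))) := by
        refine List.map_congr_left ?_
        intro c _
        rw [ih hf' c]
      rw [hcongr, PySem.List.sum_map_add_int, PySem.List.sum_map_const_int]
      ring
    rw [hL]
    -- RHS: rewrite predicate through children, split, distribute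
    have hpred : (pvE bosses).countP (fun q => q.2 == v || pvReach bosses (f+1) q.2 v)
        = (pvE bosses).countP (fun q => q.2 == v ||
            (pvChildren bosses v).any (fun c => q.2 == c || pvReach bosses f q.2 c)) := by
      refine List.countP_congr ?_
      intro q _
      simp only [Bool.or_eq_true, beq_iff_eq, List.any_eq_true]
      constructor
      · rintro (h | h)
        · exact Or.inl h
        · obtain ⟨c, hc, hd⟩ := (pvReachIff bosses f q.2 v).mp h
          refine Or.inr ⟨c, hc, ?_⟩
          rcases hd with rfl | hr
          · exact Or.inl rfl
          · exact Or.inr hr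
      · rintro (h | ⟨c, hc, hd⟩)
        · exact Or.inl h
        · refine Or.inr ((pvReachIff bosses f q.2 v).mpr ⟨c, hc, ?_⟩)
          rcases hd with h | h
          · exact Or.inl h
          · exact Or.inr h
    rw [hpred]
    have hdisj1 : ∀ q ∈ pvE bosses, ¬((q.2 == v) = true ∧
        ((pvChildren bosses v).any (fun c => q.2 == c || pvReach bosses f q.2 c)) = true) := by
      rintro q _ ⟨hqv, hany⟩
      have hqv' : q.2 = v := by simpa using hqv
      obtain ⟨c, hc, hd⟩ := List.any_eq_true.mp hany
      have hp := (pvChildren_mem bosses v c).mp hc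
      simp only [Bool.or_eq_true, beq_iff_eq] at hd
      have hcyc : pvReach bosses (f+1) v v = true := by
        rcases hd with h | h
        · rw [hqv'] at h; subst h
          exact pvReach_step bosses f v v hp
        · rw [hqv'] at h
          exact pvReach_extend bosses f v c v h hp
      rw [pvAcyc bosses hpre (f+1) (by omega) v] at hcyc
      exact Bool.noConfusion hcyc
    rw [pvCountPOr _ _ _ hdisj1]
    have hdisj2 : ∀ q ∈ pvE bosses, ∀ c1 ∈ pvChildren bosses v, ∀ c2 ∈ pvChildren bosses v,
        (q.2 == c1 || pvReach bosses f q.2 c1) = true →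
        (q.2 == c2 || pvReach bosses f q.2 c2) = true → c1 = c2 := by
      intro q _ c1 hc1 c2 hc2 h1 h2
      simp only [Bool.or_eq_true, beq_iff_eq] at h1 h2
      exact pvUniq bosses hpre f hflen v q.2 c1 c2
        ((pvChildren_mem bosses v c1).mp hc1) ((pvChildren_mem bosses v c2).mp hc2) h1 h2
    rw [pvCountPAny _ _ _ (pvChildren_nodup bosses v) hdisj2]
    -- lengths and cast of sums
    have hlen : (pvE bosses).countP (fun q => q.2 == v) = (pvChildren bosses v).length := by
      unfold pvChildren
      rw [List.length_map, List.countP_eq_length_filter]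
    rw [hlen]
    push_cast [Nat.cast_list_sum, List.map_map]
    rfl

theorem pvWalk_getD (bosses : List Int) :
    ∀ (f : Nat) (c : PySem.Dict Int Int) (b v : Int),
      PySem.Dict.getD (pvWalk (pvPar bosses) f c b) v 0 =
        PySem.Dict.getD c v 0 + ((pvChain bosses f b).count v : Int) := by
  intro f
  induction f with
  | zero => intro c b v; simp [pvWalk, pvChain]
  | succ f ih =>
    intro c b v
    show PySem.Dict.getD
        (match PySem.Dict.get? (pvPar bosses) b with
         | none => PySem.Dict.insert c b (PySem.Dict.getD c b 0 + 1)
         | some w => pvWalk (pvPar bosses) f (PySem.Dict.insert c b (PySem.Dict.getD c b 0 + 1)) w) v 0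
      = _
    rw [pvPar_get?]
    cases hp : pvParent bosses b with
    | none =>
      simp only [pvChain, hp]
      rw [PySem.Dict.getD_insert]
      by_cases hv : v = b
      · subst hv; simp
      · rw [if_neg hv]
        simp [Ne.symm hv]
    | some w =>
      simp only [pvChain, hp]
      rw [ih, PySem.Dict.getD_insert]
      by_cases hv : v = b
      · subst hv; simp; ring
      · rw [if_neg hv]
        have : b ≠ v := Ne.symm hv
        simp [this]

theorem pvFold_getD (bosses : List Int) (F : Nat) :
    ∀ (L : List Int) (c : PySem.Dict Int Int) (v : Int),
      PySem.Dict.getD (L.foldl (fun c b => pvWalk (pvPar bosses) F c b) c) v 0 =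
        PySem.Dict.getD c v 0 + ((L.map (fun b => ((pvChain bosses F b).count v : Int))).sum) := by
  intro L
  induction L with
  | nil => intro c v; simp
  | cons b L ih =>
    intro c v
    rw [List.foldl_cons, ih, pvWalk_getD]
    simp [List.map_cons]
    ring

theorem pvChain_mem (bosses : List Int) :
    ∀ (f : Nat) (b v : Int),
      v ∈ pvChain bosses (f+1) b ↔ (b = v ∨ pvReach bosses f b v = true) := by
  intro f
  induction f with
  | zero =>
    intro b v
    simp only [pvChain, pvReach]
    cases hp : pvParent bosses b <;> simp [eq_comm]
  | succ f ih =>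
    intro b v
    cases hp : pvParent bosses b with
    | none =>
      have hc : pvChain bosses (f+1+1) b = [b] := by
        show (b :: match pvParent bosses b with | none => [] | some w => pvChain bosses (f+1) w) = _
        rw [hp]
      rw [hc]
      simp only [pvReach, hp, List.mem_singleton]
      simp [eq_comm]
    | some w =>
      have hc : pvChain bosses (f+1+1) b = b :: pvChain bosses (f+1) w := by
        show (b :: match pvParent bosses b with | none => [] | some w => pvChain bosses (f+1) w) = _
        rw [hp]
      rw [hc, List.mem_cons, ih w v]
      simp only [pvReach, hp, Bool.or_eq_true, beq_iff_eq]
      constructor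
      · rintro (rfl | rfl | h)
        · exact Or.inl rfl
        · exact Or.inr (Or.inl rfl)
        · exact Or.inr (Or.inr h)
      · rintro (rfl | rfl | h)
        · exact Or.inl rfl
        · exact Or.inr (Or.inl rfl)
        · exact Or.inr (Or.inr h)

theorem pvChain_nodup (bosses : List Int) (hpre : Pre_f bosses) :
    ∀ (f : Nat), f ≤ bosses.length + 1 → ∀ (b : Int), (pvChain bosses f b).Nodup := by
  intro f
  induction f with
  | zero => intro _ b; simp [pvChain]
  | succ f ih =>
    intro hf b
    cases hp : pvParent bosses b with
    | none =>
      have hc : pvChain bosses (f+1) b = [b] := by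
        show (b :: match pvParent bosses b with | none => [] | some w => pvChain bosses f w) = _
        rw [hp]
      rw [hc]; exact List.nodup_singleton b
    | some w =>
      have hc : pvChain bosses (f+1) b = b :: pvChain bosses f w := by
        show (b :: match pvParent bosses b with | none => [] | some w => pvChain bosses f w) = _
        rw [hp]
      rw [hc, List.nodup_cons]
      refine ⟨?_, ih (by omega) w⟩
      intro hmem
      match f, hmem with
      | ff+1, hmem =>
        have := (pvChain_mem bosses ff w b).mp hmem
        have hcyc : pvReach bosses (ff+1+1) b b = true := by
          rcases this with rfl | hr
          · exact pvReach_mono bosses (ff+2) (ff+1) w w (by omega) (pvReach_step bosses ff w w hp)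
          · simp only [pvReach, hp]
            exact Bool.or_eq_true_iff.mpr (Or.inr (pvReach_mono bosses (ff+1) ff w b (by omega) hr))
        rw [pvAcyc bosses hpre (ff+2) (by omega) b] at hcyc
        exact Bool.noConfusion hcyc

theorem pvChain_count (bosses : List Int) (hpre : Pre_f bosses) (f : Nat)
    (hf : f ≤ bosses.length) (b v : Int) :
    ((pvChain bosses (f+1) b).count v : Int) =
      if (b == v || pvReach bosses f b v) = true then (1 : Int) else 0 := by
  by_cases hm : v ∈ pvChain bosses (f+1) b
  · rw [List.count_eq_one_of_mem (pvChain_nodup bosses hpre (f+1) (by omega) b) hm]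
    have := (pvChain_mem bosses f b v).mp hm
    rw [if_pos (by simp only [Bool.or_eq_true, beq_iff_eq]; exact this)]
    rfl
  · rw [List.count_eq_zero_of_not_mem hm]
    have : ¬(b = v ∨ pvReach bosses f b v = true) := fun h => hm ((pvChain_mem bosses f b v).mpr h)
    rw [if_neg (by simp only [Bool.or_eq_true, beq_iff_eq]; exact this)]
    rfl

theorem pvMain (bosses : List Int) (hpre : Pre_f bosses) (v : Int) :
    countSubs (pvAdj bosses) (bosses.length + 1) v =
      PySem.Dict.getD
        (bosses.foldl (fun c b => pvWalk (pvPar bosses) (bosses.length + 1) c b) PySem.Dict.empty)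
        v 0 := by
  rw [pvCore bosses hpre bosses.length (by omega) v]
  rw [pvFold_getD bosses (bosses.length + 1) bosses PySem.Dict.empty v]
  rw [PySem.Dict.getD_empty, zero_add]
  have hmap : bosses.map (fun b => ((pvChain bosses (bosses.length + 1) b).count v : Int))
      = bosses.map (fun b => if (b == v || pvReach bosses bosses.length b v) = true then (1 : Int) else 0) := by
    refine List.map_congr_left ?_
    intro b _
    exact pvChain_count bosses hpre bosses.length (by omega) b v
  rw [hmap, PySem.List.sum_map_ite_one_zero]
  congr 1
  have hsnd : (pvE bosses).map (fun q => q.2) = bosses := PySem.List.map_snd_enumerate bosses 0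
  calc (pvE bosses).countP (fun q => q.2 == v || pvReach bosses bosses.length q.2 v)
      = ((pvE bosses).map (fun q => q.2)).countP (fun b => b == v || pvReach bosses bosses.length b v) := by
        rw [List.countP_map]; rfl
    _ = bosses.countP (fun b => b == v || pvReach bosses bosses.length b v) := by rw [hsnd]

-- ===== VERDICT (by name: the statement is the Claim_ definition above) =====
theorem f_spec : Claim_equal_f := by
  intro bosses _ hpre
  unfold Spec_f f f_alt
  refine List.map_congr_left ?_
  intro v _
  exact pvMain bosses hpre v
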